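-- pv_equiv track=rewrite | github.com/cheefelix/PythonCodewars | 01_FormatAString.py | namelist
-- ===== SOURCE A (Python) =====
-- def namelist(names):
--     list_of_names = []
--
--     for dicts in names:
--         for key, value in dicts.items():
--             list_of_names.append( value )
--
--     if len(list_of_names) == 1:
--         return ( list_of_names[0] )
--
--     elif len(list_of_names) == 2:
--         return ( list_of_names[0] + ' & ' + list_of_names[1] )
--
--     elif len(list_of_names) > 2:
--         return ( ', '.join( list_of_names[0:len(list_of_names)-2] ) + ', ' + list_of_names[-2] + ' & ' + list_of_names[-1] )
--
--     else:
--         return ( '' )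
-- ===== SOURCE B (Python) =====
-- def namelist(names):
--     flat = [v for d in names for v in d.values()]
--     last = len(flat) - 1
--     parts = []
--     for i, name in enumerate(flat):
--         if i == 0:
--             parts.append(name)
--         elif i == last:
--             parts.append(' & ')
--             parts.append(name)
--         else:
--             parts.append(', ')
--             parts.append(name)
--     return ''.join(parts)
-- ===== Notes on version B (the rewrite author's own statement) =====
-- stated objective: alternative
-- what changed: B replaces A's branch-on-total-length formatting (', '.join of a slice plus negative-indexed last two elements) with a single forward pass that emits each name preceded by a position-dependent separator (' & ' before the last, ', ' otherwise) into a parts list finished by one empty-separator join; no length branching, slicing or negative indexing.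
import Mathlib
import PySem

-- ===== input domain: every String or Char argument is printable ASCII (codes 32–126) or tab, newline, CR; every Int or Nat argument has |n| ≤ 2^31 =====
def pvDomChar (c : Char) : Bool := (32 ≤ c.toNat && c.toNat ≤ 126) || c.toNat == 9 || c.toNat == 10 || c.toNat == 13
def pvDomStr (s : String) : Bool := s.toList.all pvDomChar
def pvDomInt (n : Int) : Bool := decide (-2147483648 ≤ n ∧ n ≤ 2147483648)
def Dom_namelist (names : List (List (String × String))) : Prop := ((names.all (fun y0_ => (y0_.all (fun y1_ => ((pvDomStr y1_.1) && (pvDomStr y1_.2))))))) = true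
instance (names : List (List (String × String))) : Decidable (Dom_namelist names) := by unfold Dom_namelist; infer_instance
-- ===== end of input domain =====

-- B replaces A's branch-on-length slice-and-join formatting with a single forward pass that
-- emits each name preceded by a position-dependent separator into a parts list, then one
-- empty-separator join (objective: alternative decomposition, same O(n) cost).


-- ===== PORT A =====
def namelist (names : List (List (String × String))) : String :=
  let list_of_names : List String :=
    names.foldl (fun acc dicts => dicts.foldl (fun acc2 kv => acc2 ++ [kv.2]) acc) []
  if list_of_names.length = 1 then
    PySem.List.pyGetD list_of_names 0 ""
  else if list_of_names.length = 2 then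
    PySem.List.pyGetD list_of_names 0 "" ++ " & " ++ PySem.List.pyGetD list_of_names 1 ""
  else if list_of_names.length > 2 then
    PySem.Str.join ", " (PySem.List.slice list_of_names (some 0) (some ((list_of_names.length : Int) - 2)))
      ++ ", " ++ PySem.List.pyGetD list_of_names (-2) ""
      ++ " & " ++ PySem.List.pyGetD list_of_names (-1) ""
  else ""

-- ===== PORT B =====
def namelist_alt (names : List (List (String × String))) : String :=
  let flat : List String := names.flatMap (fun d => d.map (·.2))
  let last : Int := (flat.length : Int) - 1
  let parts : List String :=
    (PySem.List.enumerate flat 0).foldl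
      (fun acc p =>
        if p.1 = 0 then acc ++ [p.2]
        else if p.1 = last then acc ++ [" & ", p.2]
        else acc ++ [", ", p.2]) []
  PySem.Str.join "" parts

-- ===== PRECONDITION & SPEC =====
def Spec_namelist (names : List (List (String × String))) (out : String) : Prop := out = namelist_alt names
instance (names : List (List (String × String))) (out : String) : Decidable (Spec_namelist names out) := by unfold Spec_namelist; infer_instance

-- ===== CLAIM =====
def Claim_equal_namelist : Prop := ∀ (names : List (List (String × String))), Dom_namelist names → Spec_namelist names (namelist names)

-- ===== LEMMAS AND PROOFS =====

-- A's nested append loop builds exactly the flatMap of the dict values.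
theorem pv_flat_eq (names : List (List (String × String))) :
    names.foldl (fun acc dicts => dicts.foldl (fun acc2 kv => acc2 ++ [kv.2]) acc) []
      = names.flatMap (fun d => d.map (·.2)) := by
  have h : (fun (acc : List String) (dicts : List (String × String)) =>
      dicts.foldl (fun acc2 kv => acc2 ++ [kv.2]) acc)
      = fun acc dicts => acc ++ dicts.map (·.2) := by
    funext acc d
    exact PySem.List.foldl_append_singleton_eq_map (·.2) d acc
  rw [h]
  exact PySem.List.foldl_append_eq_flatMap (fun d => d.map (·.2)) names []

theorem pv_chars_join_cons (sep x : List Char) (xs : List (List Char)) (h : xs ≠ []) :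
    PySem.Chars.join sep (x :: xs) = x ++ sep ++ PySem.Chars.join sep xs := by
  cases xs with
  | nil => exact absurd rfl h
  | cons y ys => simp [PySem.Chars.join, List.intercalate]

theorem pv_str_join_cons (s x : String) (xs : List String) (h : xs ≠ []) :
    PySem.Str.join s (x :: xs) = x ++ s ++ PySem.Str.join s xs := by
  simp only [PySem.Str.join, List.map_cons,
    pv_chars_join_cons s.toList x.toList (xs.map String.toList) (by simpa using h)]
  simp [String.append_assoc]

theorem pv_str_join_singleton (s a : String) : PySem.Str.join s [a] = a := by
  simp [PySem.Str.join, PySem.Chars.join, List.intercalate]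

theorem pv_chars_join_snoc (sep a : List Char) (xs : List (List Char)) (h : xs ≠ []) :
    PySem.Chars.join sep (xs ++ [a]) = PySem.Chars.join sep xs ++ sep ++ a := by
  induction xs with
  | nil => exact absurd rfl h
  | cons x ys ih =>
    cases ys with
    | nil => simp [PySem.Chars.join, List.intercalate]
    | cons y zs =>
      have := ih (by simp)
      simp [PySem.Chars.join, List.intercalate] at this ⊢
      simp [this]

theorem pv_str_join_snoc (s a : String) (xs : List String) (h : xs ≠ []) :
    PySem.Str.join s (xs ++ [a]) = PySem.Str.join s xs ++ s ++ a := by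
  simp only [PySem.Str.join, List.map_append, List.map_cons, List.map_nil,
    pv_chars_join_snoc s.toList a.toList (xs.map String.toList) (by simpa using h)]
  simp [String.append_assoc]

-- empty-separator join is concatenation, one cons at a time
theorem pv_str_join_empty_cons (x : String) (xs : List String) :
    PySem.Str.join "" (x :: xs) = x ++ PySem.Str.join "" xs := by
  cases xs with
  | nil => rw [pv_str_join_singleton]; simp [PySem.Str.join, PySem.Chars.join, List.intercalate]
  | cons y ys =>
    rw [pv_str_join_cons "" x (y :: ys) (by simp)]
    simp

theorem pv_str_join_empty_append (xs ys : List String) :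
    PySem.Str.join "" (xs ++ ys) = PySem.Str.join "" xs ++ PySem.Str.join "" ys := by
  induction xs with
  | nil => simp [PySem.Str.join, PySem.Chars.join, List.intercalate]
  | cons x xs ih =>
    rw [List.cons_append, pv_str_join_empty_cons, pv_str_join_empty_cons, ih,
      String.append_assoc]

-- the middle of the loop (indices strictly between 0 and L) appends ", " before each name
theorem pv_fold_mid (L : Int) (ys : List String) (s : Int) (acc : List String)
    (h1 : 1 ≤ s) (h2 : s + ys.length ≤ L) :
    (PySem.List.enumerate ys s).foldl
      (fun acc p =>
        if p.1 = 0 then acc ++ [p.2]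
        else if p.1 = L then acc ++ [" & ", p.2]
        else acc ++ [", ", p.2]) acc
      = acc ++ ys.flatMap (fun y => [", ", y]) := by
  induction ys generalizing s acc with
  | nil => simp [PySem.List.enumerate_nil]
  | cons y ys ih =>
    rw [PySem.List.enumerate_cons, List.foldl_cons]
    have hs0 : ¬ (s = 0) := by omega
    have hsL : ¬ (s = L) := by simp at h2; omega
    simp only [hs0, hsL, if_false]
    rw [ih (s + 1) _ (by omega) (by simp at h2 ⊢; omega)]
    simp

-- empty-separator join of [x, ", ", y₁, ", ", y₂, …] is the ", "-join of [x, y₁, y₂, …]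
theorem pv_join_comma (ys : List String) (x : String) :
    PySem.Str.join "" (x :: ys.flatMap (fun y => [", ", y])) = PySem.Str.join ", " (x :: ys) := by
  induction ys generalizing x with
  | nil => simp [pv_str_join_empty_cons, pv_str_join_singleton, PySem.Str.join,
      PySem.Chars.join, List.intercalate]
  | cons y ys ih =>
    rw [List.flatMap_cons, pv_str_join_empty_cons, List.cons_append, List.cons_append,
      List.nil_append, pv_str_join_empty_cons, ih y,
      pv_str_join_cons ", " x (y :: ys) (by simp)]
    simp [String.append_assoc]

-- B's whole loop on a list of length ≥ 2, written head-first
theorem pv_parts (x : String) (mid : List String) (b : String) :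
    (PySem.List.enumerate (x :: (mid ++ [b])) 0).foldl
      (fun acc p =>
        if p.1 = 0 then acc ++ [p.2]
        else if p.1 = ((((x :: (mid ++ [b])).length : Nat) : Int) - 1) then acc ++ [" & ", p.2]
        else acc ++ [", ", p.2]) []
      = x :: mid.flatMap (fun y => [", ", y]) ++ [" & ", b] := by
  have hL : (((x :: (mid ++ [b])).length : Nat) : Int) - 1 = (mid.length : Int) + 1 := by
    simp
  rw [hL, PySem.List.enumerate_cons, List.foldl_cons]
  simp only [List.nil_append, zero_add, if_true]
  rw [PySem.List.enumerate_append, List.foldl_append,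
    pv_fold_mid ((mid.length : Int) + 1) mid 1 [x] (by omega) (by omega)]
  rw [PySem.List.enumerate_cons, PySem.List.enumerate_nil, List.foldl_cons, List.foldl_nil]
  have hne0 : ¬ ((1 : Int) + mid.length = 0) := by omega
  have heq : ((1 : Int) + mid.length = (mid.length : Int) + 1) := by omega
  rw [if_neg hne0, if_pos heq]
  simp

-- B's result on a list of length ≥ 2 equals the ", "-join of all but the last, ' & ', last
theorem pv_alt_snoc2 (x : String) (mid : List String) (b : String) :
    PySem.Str.join "" (x :: mid.flatMap (fun y => [", ", y]) ++ [" & ", b])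
      = PySem.Str.join ", " (x :: mid) ++ " & " ++ b := by
  rw [pv_str_join_empty_append, pv_join_comma,
    pv_str_join_empty_cons, pv_str_join_singleton]
  simp [String.append_assoc]

-- ===== VERDICT =====
theorem namelist_spec : Claim_equal_namelist := by
  intro names _
  show namelist names = namelist_alt names
  simp only [namelist, namelist_alt]
  rw [pv_flat_eq]
  generalize names.flatMap (fun d => d.map (·.2)) = l
  induction l using List.reverseRecOn with
  | nil => rfl
  | append_singleton ys b _ =>
    cases ys using List.reverseRecOn with
    | nil =>
      simp only [List.nil_append]
      show PySem.List.pyGetD [b] 0 "" = PySem.Str.join "" _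
      rw [PySem.List.pyGetD_zero_cons,
        show PySem.List.enumerate [b] 0 = [((0 : Int), b)] from rfl, List.foldl_cons,
        List.foldl_nil]
      simp only [List.nil_append, if_true]
      rw [pv_str_join_singleton]
    | append_singleton zs a _ =>
      -- l = (zs ++ [a]) ++ [b]; write the nonempty prefix zs ++ [a] head-first as x :: mid
      obtain ⟨x, mid, hxm⟩ : ∃ x mid, zs ++ [a] = x :: mid := by
        cases zs with
        | nil => exact ⟨a, [], rfl⟩
        | cons w ws => exact ⟨w, ws ++ [a], rfl⟩
      have hl : (zs ++ [a]) ++ [b] = x :: (mid ++ [b]) := by rw [hxm]; simp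
      rw [hl, pv_parts x mid b, pv_alt_snoc2 x mid b]
      cases mid using List.reverseRecOn with
      | nil =>
        simp only [List.nil_append]
        rw [pv_str_join_singleton,
          if_neg (show ¬ ([x, b] : List String).length = 1 by simp),
          if_pos (show ([x, b] : List String).length = 2 from rfl),
          show PySem.List.pyGetD [x, b] 0 "" = x from PySem.List.pyGetD_zero_cons x [b] "",
          show PySem.List.pyGetD [x, b] 1 "" = b by rw [PySem.List.pyGetD_ofNat']; rfl]
      | append_singleton ws c _ =>
        have hshape : x :: ((ws ++ [c]) ++ [b]) = ((x :: ws) ++ [c]) ++ [b] := by simp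
        have hshape2 : x :: (ws ++ [c]) = (x :: ws) ++ [c] := by simp
        rw [hshape, hshape2]
        have h1 : ¬ (((x :: ws) ++ [c]) ++ [b]).length = 1 := by simp
        have h2 : ¬ (((x :: ws) ++ [c]) ++ [b]).length = 2 := by simp
        have h3 : (((x :: ws) ++ [c]) ++ [b]).length > 2 := by simp
        rw [if_neg h1, if_neg h2, if_pos h3]
        have hlen : (((x :: ws) ++ [c]) ++ [b]).length = ws.length + 3 := by
          simp
        have hslice : PySem.List.slice (((x :: ws) ++ [c]) ++ [b]) (some 0)
            (some ((((((x :: ws) ++ [c]) ++ [b]).length : Nat) : Int) - 2)) = x :: ws := by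
          rw [PySem.List.slice_toNat _ (by omega) (by rw [hlen]; push_cast; omega)]
          have ht : (((((x :: ws) ++ [c]) ++ [b]).length : Nat) : Int) - 2
              = (ws.length : Int) + 1 := by
            rw [hlen]; push_cast; omega
          rw [ht]
          simp [List.take_succ_cons, List.take_left]
        have hm2 : PySem.List.pyGetD (((x :: ws) ++ [c]) ++ [b]) (-2) "" = c := by
          rw [PySem.List.pyGetD_neg_ofNat _ 2 _ (by omega) (by rw [hlen]; omega)]
          simp [List.getElem_append_right]
        have hm1 : PySem.List.pyGetD (((x :: ws) ++ [c]) ++ [b]) (-1) "" = b :=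
          PySem.List.pyGetD_neg_one_append_singleton _ _ _
        rw [hslice, hm2, hm1, pv_str_join_snoc ", " c (x :: ws) (by simp)]
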